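-- pv_equiv track=rewrite | github.com/krystianbajno/encode-tools | rop_tool.py | unicode_shellcode_encode
-- ===== SOURCE A (Python) =====
-- def unicode_shellcode_encode(shellcode):
--     """Encode shellcode for Unicode buffer overflows"""
--     clean_shellcode = shellcode.replace(' ', '').replace('\\x', '')
--     encoded = ""
--
--     for i in range(0, len(clean_shellcode), 2):
--         if i + 1 < len(clean_shellcode):
--             byte_val = int(clean_shellcode[i:i+2], 16)
--             # Add null byte for Unicode (little-endian)
--             encoded += f"{byte_val:02x}00"
--
--     return encoded
-- ===== SOURCE B (Python) =====
-- def unicode_shellcode_encode(shellcode):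
--     """Encode shellcode for Unicode buffer overflows"""
--     clean_shellcode = shellcode.replace(' ', '').replace('\\x', '')
--     # pure character rewrite: pair up chars two at a time (zip(it, it) drops a
--     # trailing odd char), lowercase them, interleave the unicode null padding --
--     # for a valid hex pair, int(pair, 16) re-formatted with {:02x} is just the
--     # pair lowercased, so no numeric parsing is needed at all
--     it = iter(clean_shellcode)
--     return ''.join(hi.lower() + lo.lower() + '00' for hi, lo in zip(it, it))
-- ===== Notes on version B (the rewrite author's own statement) =====
-- stated objective: simpler
-- what changed: B does no numeric parsing or formatting at all: it pairs the cleaned characters two at a time with the zip(it, it) iterator idiom and rewrites each pair as its lowercased chars followed by the two-zero padding, relying on the identity that parsing a valid hex pair and re-formatting it as two lowercase hex digits is just lowercasing the pair, whereas A runs an index loop slicing each pair, converting it with int(...,16) and re-formatting the integer while concatenating onto a growing string.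
-- outside the precondition, e.g. on unicode_shellcode_encode('+5'): A returns '0500', B returns '+500'; on unicode_shellcode_encode('4\t1'): A returns '0400', B returns '4\t00'
import Mathlib
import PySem

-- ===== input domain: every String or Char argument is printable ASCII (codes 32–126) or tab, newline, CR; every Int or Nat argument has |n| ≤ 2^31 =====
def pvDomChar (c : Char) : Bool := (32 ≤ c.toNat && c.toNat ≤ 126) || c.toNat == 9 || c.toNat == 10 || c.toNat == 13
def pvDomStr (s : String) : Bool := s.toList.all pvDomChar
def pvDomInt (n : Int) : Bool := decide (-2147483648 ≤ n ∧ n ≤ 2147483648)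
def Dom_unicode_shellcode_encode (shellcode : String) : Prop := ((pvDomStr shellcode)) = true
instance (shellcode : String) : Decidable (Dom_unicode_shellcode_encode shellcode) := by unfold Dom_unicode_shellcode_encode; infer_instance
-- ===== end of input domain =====

-- B does no numeric parsing at all: it pairs the cleaned chars two at a time (zip(it, it)) and
-- rewrites each pair as its lowercased chars plus '00', instead of A's index loop converting each
-- sliced pair with int(...,16) and re-formatting the integer (objective: simpler).

-- both Python sources share the cleaning line
def pvClean (cs : List Char) : List Char :=
  PySem.Chars.replace (PySem.Chars.replace cs [' '] []) ['\\', 'x'] []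

def pvHexDig (n : Nat) : Char :=
  ['0','1','2','3','4','5','6','7','8','9','a','b','c','d','e','f'].getD n '0'

-- ===== PORT A =====
-- f"{v:02x}" ++ "00"; exact for 0 ≤ v ≤ 255, the only values reached under Pre_
def pvFmt02x00 (v : Int) : List Char :=
  [pvHexDig (v.toNat / 16), pvHexDig (v.toNat % 16), '0', '0']

-- int(s, 16) in total form: exact under Pre_ (every pair is valid hex; Python raises exactly where ofCharsBase? is none)
def pyInt16D (cs : List Char) : Int := (PySem.Int.ofCharsBase? cs 16).getD 0

def unicode_shellcode_encode (shellcode : String) : String :=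
  let clean := pvClean shellcode.toList
  let encoded := (PySem.List.pyRange 0 (clean.length : Int) 2).foldl
    (fun acc i =>
      if i + 1 < (clean.length : Int) then
        acc ++ pvFmt02x00 (pyInt16D (PySem.List.slice clean (some i) (some (i + 2))))
      else acc) []
  String.mk encoded

-- ===== PORT B =====
-- zip(it, it): consecutive pairs, dropping a trailing odd element
def pvPairs : List Char → List (Char × Char)
  | a :: b :: rest => (a, b) :: pvPairs rest
  | _ => []

def unicode_shellcode_encode_alt (shellcode : String) : String :=
  let clean := pvClean shellcode.toList
  String.mk (PySem.Chars.join []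
    ((pvPairs clean).map
      (fun p => [PySem.Chars.lowerChar p.1, PySem.Chars.lowerChar p.2, '0', '0'])))

-- ===== PRECONDITION & SPEC =====
-- valid hex digits (the value table used by the proofs; also defines Pre_)
def pvHexTable : List (Char × Nat) :=
  [('0',0),('1',1),('2',2),('3',3),('4',4),('5',5),('6',6),('7',7),('8',8),('9',9),
   ('a',10),('b',11),('c',12),('d',13),('e',14),('f',15),
   ('A',10),('B',11),('C',12),('D',13),('E',14),('F',15)]

def pvHexVal? (c : Char) : Option Nat :=
  (pvHexTable.find? (fun p => p.1 == c)).map (·.2)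

-- Pre_ excludes inputs whose cleaned even-length prefix contains a non-hex-digit character on which
-- int(pair, 16) still succeeds (sign or whitespace characters inside a pair, e.g. '+5' or '4\t1'):
-- A parses the pair numerically there while B merely lowercases it, so the outputs differ; plain
-- non-hex pairs make A raise ValueError.
def Pre_unicode_shellcode_encode (shellcode : String) : Prop :=
  ((pvClean shellcode.toList).take
      ((pvClean shellcode.toList).length - (pvClean shellcode.toList).length % 2)).all
    (fun c => (pvHexVal? c).isSome) = true
instance (shellcode : String) : Decidable (Pre_unicode_shellcode_encode shellcode) := by
  unfold Pre_unicode_shellcode_encode; infer_instance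

def pvWitness_unicode_shellcode_encode : String := "\\x41\\x42"

def Spec_unicode_shellcode_encode (shellcode : String) (out : String) : Prop := out = unicode_shellcode_encode_alt shellcode
instance (shellcode : String) (out : String) : Decidable (Spec_unicode_shellcode_encode shellcode out) := by unfold Spec_unicode_shellcode_encode; infer_instance

-- ===== CLAIM (what is proved, stated in full; the proofs are below) =====
def Claim_equal_unicode_shellcode_encode : Prop := ∀ (shellcode : String), Dom_unicode_shellcode_encode shellcode → Pre_unicode_shellcode_encode shellcode → Spec_unicode_shellcode_encode shellcode (unicode_shellcode_encode shellcode)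

-- ===== LEMMAS AND PROOFS =====

theorem pv_join_nil_flatten (ls : List (List Char)) :
    PySem.Chars.join [] ls = ls.flatten := by
  induction ls with
  | nil => simp [PySem.Chars.join_nil]
  | cons p tl ih =>
    cases tl with
    | nil => simp [PySem.Chars.join_singleton]
    | cons q rest =>
      rw [PySem.Chars.join_cons_cons]
      simp [ih]

-- for valid hex digits, parsing then re-formatting with {:02x}00 is exactly lowercasing the pair
theorem pv_hexPair :
    ∀ p ∈ pvHexTable, ∀ q ∈ pvHexTable,
      pvFmt02x00 ((PySem.Int.ofCharsBase? [p.1, q.1] 16).getD 0)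
        = [PySem.Chars.lowerChar p.1, PySem.Chars.lowerChar q.1, '0', '0'] := by
  decide

theorem pv_hexVal_mem {c : Char} {v : Nat} (h : pvHexVal? c = some v) : (c, v) ∈ pvHexTable := by
  unfold pvHexVal? at h
  rcases Option.map_eq_some_iff.mp h with ⟨p, hp, hv⟩
  have hm := List.mem_of_find?_eq_some hp
  have he := List.find?_some hp
  cases p with
  | mk c' v' =>
    simp only [beq_iff_eq] at he
    subst he; subst hv; exact hm

theorem pv_pairFmt {a b : Char} {va vb : Nat}
    (ha : pvHexVal? a = some va) (hb : pvHexVal? b = some vb) :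
    pvFmt02x00 (pyInt16D [a, b])
      = [PySem.Chars.lowerChar a, PySem.Chars.lowerChar b, '0', '0'] :=
  pv_hexPair (a, va) (pv_hexVal_mem ha) (b, vb) (pv_hexVal_mem hb)

theorem pv_range2_shift (n : Nat) :
    PySem.List.pyRange 0 ((n : Int) + 2) 2 = 0 :: (PySem.List.pyRange 0 (n : Int) 2).map (· + 2) := by
  rw [PySem.List.pyRange_of_pos _ _ (by norm_num : (0:Int) < 2),
      PySem.List.pyRange_of_pos _ _ (by norm_num : (0:Int) < 2)]
  rcases Nat.eq_zero_or_pos n with h0 | hpos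
  · subst h0; decide
  · have h1 : ((n : Int) + 2 - 0 + 2 - 1) / 2 = ((n + 1) / 2 + 1 : Nat) := by omega
    have h2 : ((n : Int) - 0 + 2 - 1) / 2 = ((n + 1) / 2 : Nat) := by omega
    rw [if_pos (by omega : (0:Int) < (n : Int) + 2), if_pos (by exact_mod_cast hpos), h1, h2]
    rw [Int.toNat_natCast, Int.toNat_natCast, List.range_succ_eq_map]
    simp only [List.map_cons, List.map_map]
    refine congrArg₂ _ (by norm_num) ?_
    apply List.map_congr_left
    intro k _
    simp [Nat.succ_eq_add_one]
    ring

theorem pv_evenPrefix_cons (a b : Char) (rest : List Char) :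
    ((a :: b :: rest).take ((a :: b :: rest).length - (a :: b :: rest).length % 2))
      = a :: b :: rest.take (rest.length - rest.length % 2) := by
  have h : (a :: b :: rest).length - (a :: b :: rest).length % 2
      = (rest.length - rest.length % 2) + 2 := by
    simp [List.length_cons]; omega
  rw [h]
  rfl

def pv_two_step {motive : List Char → Prop} (h0 : motive []) (h1 : ∀ a, motive [a])
    (h2 : ∀ a b rest, motive rest → motive (a :: b :: rest)) : ∀ l, motive l
  | [] => h0
  | [a] => h1 a
  | a :: b :: rest => h2 a b rest (pv_two_step h0 h1 h2 rest)

theorem pv_slice_shift (a b : Char) (rest : List Char) (i : Int) (hi : 0 ≤ i) :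
    PySem.List.slice (a :: b :: rest) (some (i + 2)) (some (i + 2 + 2))
      = PySem.List.slice rest (some i) (some (i + 2)) := by
  rw [PySem.List.slice_toNat _ (by omega) (by omega), PySem.List.slice_toNat _ (by omega) (by omega)]
  have h2 : (i + 2).toNat = i.toNat + 2 := by omega
  have h4 : (i + 2 + 2).toNat = i.toNat + 4 := by omega
  rw [h2, h4]
  simp [List.drop_succ_cons]

theorem pv_main (cs : List Char)
    (h : (cs.take (cs.length - cs.length % 2)).all (fun c => (pvHexVal? c).isSome) = true) :
    (PySem.List.pyRange 0 (cs.length : Int) 2).foldl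
      (fun acc i =>
        if i + 1 < (cs.length : Int) then
          acc ++ pvFmt02x00 (pyInt16D (PySem.List.slice cs (some i) (some (i + 2))))
        else acc) []
    = ((pvPairs cs).map
        (fun p => [PySem.Chars.lowerChar p.1, PySem.Chars.lowerChar p.2, '0', '0'])).flatten := by
  induction cs using pv_two_step with
  | h0 => decide
  | h1 a =>
    have hl : (([a] : List Char).length : Int) = 1 := by simp
    rw [hl]
    have h1 : PySem.List.pyRange 0 (1 : Int) 2 = [0] := by decide
    rw [h1, List.foldl_cons, if_neg (by norm_num : ¬ ((0:Int) + 1 < 1))]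
    rfl
  | h2 a b rest ih =>
    rw [pv_evenPrefix_cons] at h
    simp only [List.all_cons, Bool.and_eq_true] at h
    obtain ⟨ha, hb, hrest⟩ := h
    obtain ⟨va, hva⟩ := Option.isSome_iff_exists.mp ha
    obtain ⟨vb, hvb⟩ := Option.isSome_iff_exists.mp hb
    have hlen : ((a :: b :: rest).length : Int) = (rest.length : Int) + 2 := by
      simp [List.length_cons]; ring
    rw [hlen, pv_range2_shift rest.length, List.foldl_cons]
    have hc0 : ((0:Int) + 1 < (rest.length : Int) + 2) := by omega
    rw [if_pos hc0]
    have hsl0 : PySem.List.slice (a :: b :: rest) (some 0) (some (0 + 2)) = [a, b] := by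
      rw [PySem.List.slice_toNat _ (by omega) (by omega)]
      rfl
    rw [hsl0, pv_pairFmt hva hvb, List.foldl_map]
    have hcongr :
        List.foldl (fun acc i =>
            if i + 2 + 1 < (rest.length : Int) + 2 then
              acc ++ pvFmt02x00 (pyInt16D (PySem.List.slice (a :: b :: rest) (some (i + 2)) (some (i + 2 + 2))))
            else acc)
          ([] ++ [PySem.Chars.lowerChar a, PySem.Chars.lowerChar b, '0', '0'])
          (PySem.List.pyRange 0 (rest.length : Int) 2)
        = List.foldl (fun acc i =>
            acc ++ (if i + 1 < (rest.length : Int) then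
              pvFmt02x00 (pyInt16D (PySem.List.slice rest (some i) (some (i + 2)))) else []))
          ([] ++ [PySem.Chars.lowerChar a, PySem.Chars.lowerChar b, '0', '0'])
          (PySem.List.pyRange 0 (rest.length : Int) 2) := by
      apply PySem.List.foldl_congr_mem
      intro acc i hi
      have hinn : 0 ≤ i := by
        have := (PySem.List.mem_pyRange_iff_of_pos (by norm_num : (0:Int) < 2) i).mp hi
        omega
      have hiff : (i + 2 + 1 < (rest.length : Int) + 2) ↔ (i + 1 < (rest.length : Int)) := by omega
      by_cases hcc : i + 1 < (rest.length : Int)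
      · rw [if_pos (hiff.mpr hcc), if_pos hcc, pv_slice_shift a b rest i hinn]
      · rw [if_neg (fun hx => hcc (hiff.mp hx)), if_neg hcc, List.append_nil]
    rw [hcongr, PySem.List.foldl_append_eq_flatMap]
    have ih' :
        List.flatMap (fun i =>
            if i + 1 < (rest.length : Int) then
              pvFmt02x00 (pyInt16D (PySem.List.slice rest (some i) (some (i + 2)))) else [])
          (PySem.List.pyRange 0 (rest.length : Int) 2)
        = ((pvPairs rest).map
            (fun p => [PySem.Chars.lowerChar p.1, PySem.Chars.lowerChar p.2, '0', '0'])).flatten := by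
      have := ih hrest
      rwa [show (fun (acc : List Char) (i : Int) =>
          if i + 1 < (rest.length : Int) then
            acc ++ pvFmt02x00 (pyInt16D (PySem.List.slice rest (some i) (some (i + 2))))
          else acc)
        = (fun acc i => acc ++ (if i + 1 < (rest.length : Int) then
            pvFmt02x00 (pyInt16D (PySem.List.slice rest (some i) (some (i + 2)))) else []))
        from by funext acc i; split_ifs <;> simp,
        PySem.List.foldl_append_eq_flatMap, List.nil_append] at this
    rw [List.nil_append, ih']
    simp [pvPairs]

-- ===== VERDICT (by name: the statement is the Claim_ definition above) =====
theorem unicode_shellcode_encode_spec : Claim_equal_unicode_shellcode_encode := by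
  intro shellcode _ hpre
  unfold Spec_unicode_shellcode_encode unicode_shellcode_encode unicode_shellcode_encode_alt
  dsimp only
  rw [pv_main (pvClean shellcode.toList) hpre, pv_join_nil_flatten]
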